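-- pv_equiv track=rewrite | github.com/ChampCityChris/TazUO-Legion-Scripts | Scripts/Utilities/GumpMapper.py | _split_visible_lines
-- ===== SOURCE A (Python) =====
-- def _safe_str(value):
--     """Return safe string."""
--     try:
--         return "" if value is None else str(value)
--     except Exception:
--         return ""
--
-- def _split_visible_lines(raw_text):
--     """Split GetGumpContents text into non-empty lines."""
--     text = _safe_str(raw_text).replace("\r\n", "\n").replace("\r", "\n")
--     lines = []
--     for line in text.split("\n"):
--         if "|" in line:
--             for chunk in line.split("|"):
--                 part = _safe_str(chunk).strip()
--                 if part:
--                     lines.append(part)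
--         else:
--             part = _safe_str(line).strip()
--             if part:
--                 lines.append(part)
--     return lines
-- ===== SOURCE B (Python) =====
-- def _split_visible_lines(raw_text):
--     """Split GetGumpContents text into non-empty lines (single char scan)."""
--     text = "" if raw_text is None else str(raw_text)
--     out = []
--     token = []
--     for ch in text:
--         if ch in "\r\n|":
--             part = "".join(token).strip()
--             if part:
--                 out.append(part)
--             token = []
--         else:
--             token.append(ch)
--     part = "".join(token).strip()
--     if part:
--         out.append(part)
--     return out
-- ===== Notes on version B (the rewrite author's own statement) =====
-- stated objective: alternative
-- what changed: Replaces A's replace-normalization plus nested split/branch passes with a single left-to-right character scan that emits a stripped token at every delimiter ('\r', '\n', '|'), dropping empties as it goes.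
import Mathlib
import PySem

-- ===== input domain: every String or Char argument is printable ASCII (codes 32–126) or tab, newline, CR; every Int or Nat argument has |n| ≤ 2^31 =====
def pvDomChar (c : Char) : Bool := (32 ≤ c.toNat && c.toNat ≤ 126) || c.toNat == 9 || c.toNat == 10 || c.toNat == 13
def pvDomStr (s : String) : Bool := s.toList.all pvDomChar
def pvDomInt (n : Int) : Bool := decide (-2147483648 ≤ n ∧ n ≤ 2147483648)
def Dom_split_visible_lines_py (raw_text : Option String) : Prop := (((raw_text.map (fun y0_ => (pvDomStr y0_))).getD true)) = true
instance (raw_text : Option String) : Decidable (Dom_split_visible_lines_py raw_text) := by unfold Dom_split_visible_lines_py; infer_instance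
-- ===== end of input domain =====

-- B replaces A's replace-normalization plus nested split/branch passes with a single
-- left-to-right character scan emitting stripped non-empty tokens at each of '\r', '\n', '|'
-- (alternative decomposition, same complexity).

-- ===== PORT A =====
-- _safe_str(raw_text) = "" if raw_text is None else str(raw_text)  →  raw_text.getD ""
def split_visible_lines_py (raw_text : Option String) : List String :=
  let text := PySem.Str.replace (PySem.Str.replace (raw_text.getD "") "\r\n" "\n") "\r" "\n"
  ((PySem.Str.split? text "\n").getD []).foldl (fun lines line =>
    if PySem.Str.isIn "|" line then
      ((PySem.Str.split? line "|").getD []).foldl (fun ls chunk =>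
        let part := PySem.Str.strip chunk
        if part ≠ "" then ls ++ [part] else ls) lines
    else
      let part := PySem.Str.strip line
      if part ≠ "" then lines ++ [part] else lines) []

-- ===== PORT B =====
def split_visible_lines_py_alt (raw_text : Option String) : List String :=
  let text := raw_text.getD ""
  let st := text.toList.foldl (fun (st : List String × List Char) ch =>
      if ch = '\r' ∨ ch = '\n' ∨ ch = '|' then
        let part := PySem.Str.strip (String.ofList st.2)
        (if part ≠ "" then st.1 ++ [part] else st.1, ([] : List Char))
      else (st.1, st.2 ++ [ch])) ([], [])
  let part := PySem.Str.strip (String.ofList st.2)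
  if part ≠ "" then st.1 ++ [part] else st.1

-- ===== PRECONDITION & SPEC =====
def Spec_split_visible_lines_py (raw_text : Option String) (out : List String) : Prop := out = split_visible_lines_py_alt raw_text
instance (raw_text : Option String) (out : List String) : Decidable (Spec_split_visible_lines_py raw_text out) := by unfold Spec_split_visible_lines_py; infer_instance

-- ===== CLAIM (what is proved, stated in full; the proofs are below) =====
def Claim_equal_split_visible_lines_py : Prop := ∀ (raw_text : Option String), Dom_split_visible_lines_py raw_text → Spec_split_visible_lines_py raw_text (split_visible_lines_py raw_text)

-- ===== LEMMAS AND PROOFS =====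
def pvSc (p : Char → Bool) : List Char → List Char × List (List Char)
  | [] => ([], [])
  | c :: t => let r := pvSc p t; if p c then ([], r.1 :: r.2) else (c :: r.1, r.2)
def pvTokens (p : Char → Bool) (l : List Char) : List (List Char) :=
  (pvSc p l).1 :: (pvSc p l).2
def pvSep (c : Char) : Bool := c == '\r' || c == '\n' || c == '|'
def pvFilt (xs : List (List Char)) : List (List Char) :=
  (xs.map PySem.Chars.strip).filter (· ≠ [])
def pvNorm (l : List Char) : List String :=
  (pvFilt (pvTokens pvSep l)).map String.ofList

theorem pvStrip_ofList (l : List Char) :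
    PySem.Str.strip (String.ofList l) = String.ofList (PySem.Chars.strip l) := by
  have h : (PySem.Str.strip (String.ofList l)).toList = PySem.Chars.strip l := by
    rw [PySem.Str.toList_strip]; simp
  exact String.toList_inj.mp (by simpa using h)

theorem pvOfList_ne_empty (l : List Char) : (String.ofList l ≠ "") ↔ l ≠ [] := by
  constructor
  · intro h hl; subst hl; simp at h
  · intro h he
    have : (String.ofList l).toList = ("" : String).toList := by rw [he]
    simp at this; exact h this

theorem pvB_inv (l : List Char) (out : List String) (tk : List Char) :
    (let st := l.foldl (fun (st : List String × List Char) ch =>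
      if ch = '\r' ∨ ch = '\n' ∨ ch = '|' then
        let part := PySem.Str.strip (String.ofList st.2)
        (if part ≠ "" then st.1 ++ [part] else st.1, ([] : List Char))
      else (st.1, st.2 ++ [ch])) (out, tk)
     let part := PySem.Str.strip (String.ofList st.2)
     if part ≠ "" then st.1 ++ [part] else st.1)
    = out ++ (pvFilt ((tk ++ (pvSc pvSep l).1) :: (pvSc pvSep l).2)).map String.ofList := by
  induction l generalizing out tk with
  | nil =>
    simp [pvFilt, pvSc, pvStrip_ofList, pvOfList_ne_empty]
    by_cases h : PySem.Chars.strip tk = [] <;> simp [h]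
  | cons c t ih =>
    by_cases hc : c = '\r' ∨ c = '\n' ∨ c = '|'
    · have hsep : pvSep c = true := by
        rcases hc with h|h|h <;> simp [pvSep, h]
      simp only [List.foldl_cons, if_pos hc]
      rw [ih]
      simp [pvSc, hsep, pvFilt, pvStrip_ofList, pvOfList_ne_empty]
      by_cases h : PySem.Chars.strip tk = [] <;> simp [h]
    · have hsep : pvSep c = false := by
        simp [pvSep]; tauto
      simp only [List.foldl_cons, if_neg hc]
      rw [ih]
      simp [pvSc, hsep]

def pvR1 : List Char → List Char
  | [] => []
  | [c] => [c]
  | c :: d :: t => if c = '\r' ∧ d = '\n' then '\n' :: pvR1 t else c :: pvR1 (d :: t)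

def pvF (c : Char) : Char := if c == '\r' then '\n' else c

-- splitOn with a single-character separator is pvTokens
theorem pvSplitOn_go (c : Char) (fuel : Nat) (l cur : List Char) (acc : List (List Char))
    (h : l.length ≤ fuel) :
    PySem.Chars.splitOn.go [c] fuel l cur acc
      = acc.reverse ++ ((cur.reverse ++ (pvSc (· == c) l).1) :: (pvSc (· == c) l).2) := by
  induction fuel generalizing l cur acc with
  | zero =>
    have : l = [] := by cases l <;> simp_all
    subst this
    rw [PySem.Chars.splitOn.go]
    simp [pvSc]
  | succ n ih =>
    cases l with
    | nil => rw [PySem.Chars.splitOn.go]; simp [pvSc]; omega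
    | cons x t =>
      by_cases hx : x = c
      · subst hx
        rw [PySem.Chars.splitOn.go]
        simp only [List.isPrefixOf, beq_self_eq_true, Bool.true_and, if_pos]
        simp only [List.length_cons, List.length_nil, List.drop_succ_cons, List.drop_zero]
        rw [ih t [] (cur.reverse :: acc) (by simpa using Nat.le_of_succ_le_succ h)]
        simp [pvSc]
      · rw [PySem.Chars.splitOn.go]
        have : [c].isPrefixOf (x :: t) = false := by
          simp [List.isPrefixOf]; exact fun he => absurd he.symm hx
        rw [this]
        simp only [Bool.false_eq_true, if_neg, not_false_iff]
        rw [ih t (x :: cur) acc (by simpa using Nat.le_of_succ_le_succ h)]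
        simp [pvSc, hx]

theorem pvSplitOn_single (c : Char) (l : List Char) :
    PySem.Chars.splitOn l [c] = pvTokens (· == c) l := by
  unfold PySem.Chars.splitOn
  rw [pvSplitOn_go c (l.length + 1) l [] [] (by omega)]
  simp [pvTokens]

-- replace with a single-character pattern is map
theorem pvReplace_go_single (a b : Char) (fuel : Nat) (l acc : List Char)
    (h : l.length ≤ fuel) :
    PySem.Chars.replace.go [a] [b] fuel l acc
      = acc.reverse ++ l.map (fun x => if x == a then b else x) := by
  induction fuel generalizing l acc with
  | zero =>
    have : l = [] := by cases l <;> simp_all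
    subst this; rw [PySem.Chars.replace.go]; simp
  | succ n ih =>
    cases l with
    | nil => rw [PySem.Chars.replace.go]; simp; omega
    | cons x t =>
      by_cases hx : x = a
      · subst hx
        rw [PySem.Chars.replace.go]
        simp only [List.isPrefixOf, beq_self_eq_true, Bool.true_and, if_pos]
        simp only [List.length_cons, List.length_nil, List.drop_succ_cons, List.drop_zero]
        rw [ih t ([b].reverse ++ acc) (by simpa using Nat.le_of_succ_le_succ h)]
        simp
      · rw [PySem.Chars.replace.go]
        have : [a].isPrefixOf (x :: t) = false := by
          simp [List.isPrefixOf]; exact fun he => absurd he.symm hx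
        rw [this]
        simp only [Bool.false_eq_true, if_neg, not_false_iff]
        rw [ih t (x :: acc) (by simpa using Nat.le_of_succ_le_succ h)]
        simp [hx]

theorem pvReplace_single (a b : Char) (l : List Char) :
    PySem.Chars.replace l [a] [b] = l.map (fun x => if x == a then b else x) := by
  unfold PySem.Chars.replace
  rw [if_neg (by simp)]
  rw [pvReplace_go_single a b l.length l [] (le_refl _)]
  simp

-- replace with pattern "\r\n" and replacement "\n" is pvR1
theorem pvReplace_go_crlf (fuel : Nat) (l acc : List Char) (h : l.length ≤ fuel) :
    PySem.Chars.replace.go ['\r', '\n'] ['\n'] fuel l acc = acc.reverse ++ pvR1 l := by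
  induction fuel generalizing l acc with
  | zero =>
    have : l = [] := by cases l <;> simp_all
    subst this; rw [PySem.Chars.replace.go]; simp [pvR1]
  | succ n ih =>
    cases l with
    | nil => rw [PySem.Chars.replace.go]; simp [pvR1]; omega
    | cons c t =>
      cases t with
      | nil =>
        rw [PySem.Chars.replace.go]
        rw [if_neg (by simp [List.isPrefixOf])]
        rw [ih [] (c :: acc) (by simp)]
        simp [pvR1]
      | cons d t' =>
        by_cases hcd : c = '\r' ∧ d = '\n'
        · obtain ⟨hc, hd⟩ := hcd; subst hc; subst hd
          rw [PySem.Chars.replace.go]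
          rw [if_pos (by simp [List.isPrefixOf])]
          simp only [List.length_cons, List.length_nil, List.drop_succ_cons, List.drop_zero]
          rw [ih t' (['\n'].reverse ++ acc) (by simp at h ⊢; omega)]
          simp [pvR1]
        · rw [PySem.Chars.replace.go]
          rw [if_neg (by simp [List.isPrefixOf]; intro h1 h2; exact hcd ⟨h1.symm, h2.symm⟩)]
          rw [ih (d :: t') (c :: acc) (by simp at h ⊢; omega)]
          simp [pvR1, hcd]

-- splitting then splitting each piece again = split on the union of separators
theorem pvFlatMap_tokens (pA pB : Char → Bool) (l : List Char) :
    (pvTokens pA l).flatMap (pvTokens pB) = pvTokens (fun c => pA c || pB c) l := by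
  induction l with
  | nil => simp [pvTokens, pvSc]
  | cons c t ih =>
    have ih' : (pvSc pB (pvSc pA t).1).1 ::
        ((pvSc pB (pvSc pA t).1).2 ++ (pvSc pA t).2.flatMap (pvTokens pB))
        = (pvSc (fun c => pA c || pB c) t).1 :: (pvSc (fun c => pA c || pB c) t).2 := by
      simpa [pvTokens, List.flatMap_cons, List.cons_append] using ih
    obtain ⟨e1, e2⟩ := List.cons.inj ih'
    by_cases hA : pA c
    · have h1 : pvTokens pA (c :: t) = [] :: pvTokens pA t := by
        simp [pvTokens, pvSc, hA]
      rw [h1, List.flatMap_cons, ih]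
      have h2 : pvTokens pB [] = [[]] := by simp [pvTokens, pvSc]
      rw [h2]
      simp [pvTokens, pvSc, hA]
    · by_cases hB : pB c
      · simp only [pvTokens, pvSc, hA, hB, Bool.false_eq_true, if_neg, not_false_iff,
          Bool.false_or, if_pos, List.flatMap_cons, List.cons_append]
        simp [e1, e2]
      · simp only [pvTokens, pvSc, hA, hB, Bool.false_eq_true, Bool.false_or, if_neg,
          not_false_iff, List.flatMap_cons, List.cons_append]
        simp [e1, e2]

-- token contents never satisfy the separator predicate
theorem pvSc_content (p : Char → Bool) (l : List Char) :
    (∀ c ∈ (pvSc p l).1, p c = false) ∧ (∀ x ∈ (pvSc p l).2, ∀ c ∈ x, p c = false) := by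
  induction l with
  | nil => simp [pvSc]
  | cons c t ih =>
    by_cases hc : p c
    · simp only [pvSc, hc, if_pos]
      refine ⟨by simp, ?_⟩
      intro x hx
      simp at hx
      rcases hx with h | h
      · subst h; exact ih.1
      · exact ih.2 x h
    · simp only [pvSc, hc, Bool.false_eq_true, if_neg, not_false_iff]
      refine ⟨?_, ih.2⟩
      intro d hd
      simp at hd
      rcases hd with h | h
      · subst h; simpa using hc
      · exact ih.1 d h

-- pvTokens over a mapped list
theorem pvSc_map (p : Char → Bool) (f : Char → Char) (l : List Char) :
    pvSc p (l.map f) = ((pvSc (fun c => p (f c)) l).1.map f,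
      (pvSc (fun c => p (f c)) l).2.map (List.map f)) := by
  induction l with
  | nil => simp [pvSc]
  | cons c t ih =>
    by_cases hc : p (f c) <;> simp [pvSc, hc, ih]

theorem pvFilt_cons (x : List Char) (xs : List (List Char)) :
    pvFilt (x :: xs) = (if PySem.Chars.strip x ≠ [] then [PySem.Chars.strip x] else []) ++ pvFilt xs := by
  by_cases h : PySem.Chars.strip x = [] <;> simp [pvFilt, h]

theorem pvSc_cons (p : Char → Bool) (c : Char) (t : List Char) :
    pvSc p (c :: t) = if p c then ([], (pvSc p t).1 :: (pvSc p t).2)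
      else (c :: (pvSc p t).1, (pvSc p t).2) := by
  simp [pvSc]

theorem pvStrip_nil : PySem.Chars.strip [] = [] := by
  simp [PySem.Chars.strip, PySem.Chars.lstrip, PySem.Chars.rstrip]

-- collapsing "\r\n" to "\n" does not change the non-empty stripped tokens
theorem pvR1_sc (t : List Char) :
    (pvSc pvSep (pvR1 t)).1 = (pvSc pvSep t).1 ∧
    pvFilt (pvSc pvSep (pvR1 t)).2 = pvFilt (pvSc pvSep t).2 := by
  match t with
  | [] => simp [pvR1]
  | [c] => simp [pvR1]
  | c :: d :: t =>
    have ih1 := pvR1_sc t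
    have ih2 := pvR1_sc (d :: t)
    have hsep : pvSep '\n' = true := by simp [pvSep]
    have hsepr : pvSep '\r' = true := by simp [pvSep]
    by_cases hcd : c = '\r' ∧ d = '\n'
    · obtain ⟨hc, hd⟩ := hcd; subst hc; subst hd
      have h1 : pvR1 ('\r' :: '\n' :: t) = '\n' :: pvR1 t := by simp [pvR1]
      rw [h1, pvSc_cons, if_pos hsep, pvSc_cons, if_pos hsepr, pvSc_cons, if_pos hsep]
      refine ⟨rfl, ?_⟩
      simp only []
      rw [pvFilt_cons, pvFilt_cons, pvFilt_cons, ih1.1, ih1.2, pvStrip_nil]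
      simp
    · have h1 : pvR1 (c :: d :: t) = c :: pvR1 (d :: t) := by simp [pvR1, hcd]
      rw [h1, pvSc_cons, pvSc_cons]
      by_cases hc : pvSep c
      · rw [if_pos hc, if_pos hc]
        refine ⟨rfl, ?_⟩
        simp only []
        rw [pvFilt_cons, pvFilt_cons, ih2.1, ih2.2]
      · rw [if_neg (by simp [hc]), if_neg (by simp [hc])]
        exact ⟨by simp [ih2.1], by simp [ih2.2]⟩

theorem pvFilt_R1 (t : List Char) :
    pvFilt (pvTokens pvSep (pvR1 t)) = pvFilt (pvTokens pvSep t) := by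
  have h := pvR1_sc t
  simp only [pvTokens]
  rw [pvFilt_cons, pvFilt_cons, h.1, h.2]

-- a list without separators is a single token
theorem pvTokens_no_sep (p : Char → Bool) (l : List Char) (h : ∀ c ∈ l, p c = false) :
    pvTokens p l = [l] := by
  induction l with
  | nil => simp [pvTokens, pvSc]
  | cons c t ih =>
    have hc : p c = false := h c (by simp)
    have ht := ih (fun d hd => h d (by simp [hd]))
    simp only [pvTokens, pvSc, hc, Bool.false_eq_true, if_neg, not_false_iff]
    simp [pvTokens] at ht
    simp [ht.1, ht.2]

theorem pvReplace_crlf (l : List Char) :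
    PySem.Chars.replace l ['\r', '\n'] ['\n'] = pvR1 l := by
  unfold PySem.Chars.replace
  rw [if_neg (by simp)]
  rw [pvReplace_go_crlf l.length l [] (le_refl _)]
  simp

theorem pvText_toList (s0 : String) :
    (PySem.Str.replace (PySem.Str.replace s0 "\r\n" "\n") "\r" "\n").toList
      = (pvR1 s0.toList).map pvF := by
  have h1 : ("\r\n" : String).toList = ['\r', '\n'] := by decide
  have h2 : ("\n" : String).toList = ['\n'] := by decide
  have h3 : ("\r" : String).toList = ['\r'] := by decide
  simp only [PySem.Str.replace, String.toList_ofList, h1, h2, h3]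
  rw [pvReplace_crlf]
  rw [pvReplace_single]
  rfl

theorem pvSplitQ (s : String) (c : Char) (h : (String.ofList [c]).toList = [c]) :
    (PySem.Str.split? s (String.ofList [c])).getD []
      = (pvTokens (· == c) s.toList).map String.ofList := by
  simp only [PySem.Str.split?, PySem.Chars.split?, h]
  rw [if_neg (by simp)]
  simp [pvSplitOn_single]

theorem pvFold_strip (xs : List (List Char)) (acc : List String) :
    (xs.map String.ofList).foldl (fun ls chunk =>
      let part := PySem.Str.strip chunk
      if part ≠ "" then ls ++ [part] else ls) acc
    = acc ++ (pvFilt xs).map String.ofList := by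
  induction xs generalizing acc with
  | nil => simp [pvFilt]
  | cons x t ih =>
    simp only [List.map_cons, List.foldl_cons]
    rw [pvStrip_ofList]
    rw [pvFilt_cons]
    by_cases h : PySem.Chars.strip x = []
    · rw [if_neg (by simp [h, pvOfList_ne_empty])]
      rw [ih]; simp [h]
    · rw [if_pos (by simp [(pvOfList_ne_empty _).mpr h])]
      rw [ih]; simp [h]

theorem pvNoPipe (line : String) (h : PySem.Str.isIn "|" line = false) :
    ∀ c ∈ line.toList, (c == '|') = false := by
  intro c hc
  have hinf : ¬ ['|'] <:+: line.toList := by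
    have hiff := PySem.Chars.findFrom_natCast_eq_neg_one_iff line.toList ['|'] 0 (by simp)
    simp only [List.drop_zero, Nat.cast_zero] at hiff
    rw [PySem.Chars.findFrom_zero] at hiff
    apply hiff.mp
    simp only [PySem.Str.isIn, PySem.Chars.isIn] at h
    have h1 : ("|" : String).toList = ['|'] := by decide
    rw [h1] at h
    simpa using h
  simp only [beq_eq_false_iff_ne, ne_eq]
  intro he; subst he
  obtain ⟨l1, l2, hl⟩ := List.append_of_mem hc
  exact hinf ⟨l1, l2, by rw [hl]; simp⟩

theorem pvFold_concat (g : String → List String) (ts : List String) (acc : List String) :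
    ts.foldl (fun ls line => ls ++ g line) acc = acc ++ ts.flatMap g := by
  induction ts generalizing acc with
  | nil => simp
  | cons x t ih => simp [ih]

theorem pvPorSep : (fun c => (c == '\n') || (c == '|')) ∘ pvF = pvSep := by
  funext c
  by_cases hc : c = '\r'
  · simp [pvF, pvSep, hc]
  · have h0 : (c == '\r') = false := by simp [hc]
    simp [pvF, pvSep, hc, h0]

theorem pvInnerA (line : String) (acc : List String) :
    (if PySem.Str.isIn "|" line then
      ((PySem.Str.split? line "|").getD []).foldl (fun ls chunk =>
        let part := PySem.Str.strip chunk
        if part ≠ "" then ls ++ [part] else ls) acc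
    else
      let part := PySem.Str.strip line
      if part ≠ "" then acc ++ [part] else acc)
    = acc ++ (pvFilt (pvTokens (· == '|') line.toList)).map String.ofList := by
  have hsplit : (PySem.Str.split? line "|").getD []
      = (pvTokens (· == '|') line.toList).map String.ofList := by
    have := pvSplitQ line '|' (by decide)
    simpa using this
  by_cases h : PySem.Str.isIn "|" line
  · rw [if_pos h, hsplit, pvFold_strip]
  · rw [if_neg h]
    have h1 : pvTokens (· == '|') line.toList = [line.toList] :=
      pvTokens_no_sep _ _ (pvNoPipe line (by rw [← Bool.not_eq_true]; exact h))
    rw [h1]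
    simp only [List.map_cons, List.map_nil]
    have h2 : String.ofList line.toList = line := by simp
    have := pvFold_strip [line.toList] acc
    simp only [List.map_cons, List.map_nil, List.foldl_cons, List.foldl_nil, h2] at this
    simpa [h2] using this

theorem pvFilt_append (a b : List (List Char)) :
    pvFilt (a ++ b) = pvFilt a ++ pvFilt b := by
  simp [pvFilt]

theorem pvFilt_flatMap (f : List Char → List (List Char)) (ts : List (List Char)) :
    ts.flatMap (fun x => pvFilt (f x)) = pvFilt (ts.flatMap f) := by
  induction ts with
  | nil => simp [pvFilt]
  | cons x t ih => simp [List.flatMap_cons, pvFilt_append, ih]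

theorem pvMap_flatMap (f : List Char → List (List Char)) (ts : List (List Char)) :
    ts.flatMap (fun x => (f x).map String.ofList) = (ts.flatMap f).map String.ofList := by
  induction ts with
  | nil => simp
  | cons x t ih => simp [List.flatMap_cons, ih]

theorem pvMap_id (x : List Char) (hx : ∀ c ∈ x, pvSep c = false) : x.map pvF = x := by
  induction x with
  | nil => simp
  | cons c t iht =>
    have hc := hx c (by simp)
    simp [pvSep] at hc
    simp only [List.map_cons]
    rw [iht (fun d hd => hx d (by simp [hd]))]
    simp [pvF, hc.1]

theorem pvMapMap_id (xs : List (List Char)) (h : ∀ x ∈ xs, ∀ c ∈ x, pvSep c = false) :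
    xs.map (List.map pvF) = xs := by
  induction xs with
  | nil => simp
  | cons y ys ihy =>
    simp only [List.map_cons]
    rw [pvMap_id y (h y (by simp)), ihy (fun x hx => h x (by simp [hx]))]

theorem pvTokens_map_pvF (m : List Char) :
    pvTokens (fun c => (c == '\n') || (c == '|')) (m.map pvF)
      = pvTokens pvSep m := by
  have h := pvSc_map (fun c => (c == '\n') || (c == '|')) pvF m
  have hps : (fun c => ((pvF c) == '\n') || ((pvF c) == '|')) = pvSep := pvPorSep
  simp only [hps] at h
  have hcontent := pvSc_content pvSep m
  simp only [pvTokens, h]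
  rw [pvMap_id _ hcontent.1, pvMapMap_id _ hcontent.2]

theorem pvA_norm (raw_text : Option String) :
    split_visible_lines_py raw_text = pvNorm (raw_text.getD "").toList := by
  unfold split_visible_lines_py
  have hnl : ("\n" : String) = String.ofList ['\n'] := by decide
  have hsplit : (PySem.Str.split?
        (PySem.Str.replace (PySem.Str.replace (raw_text.getD "") "\r\n" "\n") "\r" "\n") "\n").getD []
      = (pvTokens (· == '\n')
          (PySem.Str.replace (PySem.Str.replace (raw_text.getD "") "\r\n" "\n") "\r" "\n").toList).map
          String.ofList := by
    rw [hnl]; exact pvSplitQ _ '\n' (by decide)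
  simp only [hsplit]
  have hfun : (fun (lines : List String) (line : String) =>
      if PySem.Str.isIn "|" line then
        ((PySem.Str.split? line "|").getD []).foldl (fun ls chunk =>
          let part := PySem.Str.strip chunk
          if part ≠ "" then ls ++ [part] else ls) lines
      else
        let part := PySem.Str.strip line
        if part ≠ "" then lines ++ [part] else lines)
      = fun lines line => lines ++ (pvFilt (pvTokens (· == '|') line.toList)).map String.ofList := by
    funext lines line
    exact pvInnerA line lines
  rw [hfun, pvFold_concat]
  rw [List.flatMap_map]
  simp only [Function.comp, String.toList_ofList]
  rw [pvMap_flatMap, pvFilt_flatMap]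
  have := pvFlatMap_tokens (· == '\n') (· == '|')
      (PySem.Str.replace (PySem.Str.replace (raw_text.getD "") "\r\n" "\n") "\r" "\n").toList
  simp only [pvTokens] at this ⊢
  rw [this]
  rw [pvText_toList]
  have h2 := pvTokens_map_pvF (pvR1 (raw_text.getD "").toList)
  simp only [pvTokens] at h2
  rw [h2]
  have h3 := pvFilt_R1 (raw_text.getD "").toList
  simp only [pvTokens] at h3
  rw [pvNorm, pvTokens, h3]
  simp

theorem pvB_norm (raw_text : Option String) :
    split_visible_lines_py_alt raw_text = pvNorm (raw_text.getD "").toList := by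
  unfold split_visible_lines_py_alt
  have := pvB_inv (raw_text.getD "").toList [] []
  simpa [pvNorm, pvTokens] using this

-- ===== VERDICT (by name: the statement is the Claim_ definition above) =====
theorem split_visible_lines_py_spec : Claim_equal_split_visible_lines_py := by
  intro raw_text _
  unfold Spec_split_visible_lines_py
  rw [pvA_norm, pvB_norm]
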